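-- pv_equiv track=rewrite | github.com/jieun1009/algorithm | programmers/과일장수.py | solution
-- ===== SOURCE A (Python) =====
-- def solution(k, m, score):
--     answer = 0
--
--     score.sort(reverse=True)
--     total = []
--     arr = []
--     for i in score:
--
--         arr.append(i)
--
--         if len(arr) >= m:
--             total.append(arr)
--             arr = []
--
--     price = 0
--     for i in total:
--         i.sort()
--         price += i[0] * m
--
--     return price
-- ===== SOURCE B (Python) =====
-- def solution(k, m, score):
--     # sort in place, descending, to preserve A's argument mutation
--     score.sort(reverse=True)
--     n = len(score) // m
--     # after the descending sort, the minimum of full box j is its last element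
--     return sum(score[j * m + m - 1] * m for j in range(n))
-- ===== Notes on version B (the rewrite author's own statement) =====
-- stated objective: simpler
-- what changed: Instead of materialising the boxes as sublists and sorting each box ascending to find its minimum, B indexes the descending-sorted list directly: the minimum of full box j is the element at position j*m+m-1, summed over the len(score)//m complete boxes.
-- outside the precondition, e.g. on solution(0, 0, [1]): A returns 0, B raises ZeroDivisionError; on solution(0, -1, [3, 2]): A returns -5, B returns 0
import Mathlib
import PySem

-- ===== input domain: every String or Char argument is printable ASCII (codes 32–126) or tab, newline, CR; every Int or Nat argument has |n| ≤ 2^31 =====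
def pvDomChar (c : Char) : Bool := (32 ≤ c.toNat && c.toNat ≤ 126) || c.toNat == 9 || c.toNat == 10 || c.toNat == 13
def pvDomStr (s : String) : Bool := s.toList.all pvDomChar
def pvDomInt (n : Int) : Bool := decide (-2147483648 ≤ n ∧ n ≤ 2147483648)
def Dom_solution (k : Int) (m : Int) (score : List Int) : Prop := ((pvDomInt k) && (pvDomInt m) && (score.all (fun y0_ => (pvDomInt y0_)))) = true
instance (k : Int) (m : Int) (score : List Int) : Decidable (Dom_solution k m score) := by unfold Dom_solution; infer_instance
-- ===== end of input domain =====

-- B replaces A's per-box sublists and ascending per-box sorts by direct stride indexing of the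
-- descending-sorted list (objective: simpler). Both A and B sort the `score` argument in place
-- (descending); the equivalence proved here is about the return value.

-- ===== PORT A =====
def solution (k : Int) (m : Int) (score : List Int) : Int :=
  let s := PySem.List.sorted score (fun x => x) true
  let st := s.foldl
    (fun (st : List (List Int) × List Int) i =>
      let arr := st.2 ++ [i]
      if m ≤ (arr.length : Int) then (st.1 ++ [arr], ([] : List Int)) else (st.1, arr))
    ([], [])
  -- i[0]: every appended box is nonempty (the element is appended before the length test),
  -- so the default of pyGetD is never taken
  st.1.foldl (fun price c => price + PySem.List.pyGetD (PySem.List.sorted c (fun x => x) false) 0 0 * m) 0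

-- ===== PORT B =====
def solution_alt (k : Int) (m : Int) (score : List Int) : Int :=
  let s := PySem.List.sorted score (fun x => x) true
  let n := PySem.Int.floordiv (s.length : Int) m
  ((PySem.List.pyRange 0 n 1).map (fun j => PySem.List.pyGetD s (j * m + m - 1) 0 * m)).sum

-- ===== PRECONDITION & SPEC =====
-- Pre_ restricts to the natural domain of a positive box size m ≥ 1: for m ≤ 0 A's
-- `len(arr) >= m` test fires on every element, so each score is boxed alone and A returns
-- sum(score)*m, while B's floor division yields no full boxes (and raises ZeroDivisionError at m = 0).
def Pre_solution (k : Int) (m : Int) (score : List Int) : Prop := 1 ≤ m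
instance (k : Int) (m : Int) (score : List Int) : Decidable (Pre_solution k m score) := by unfold Pre_solution; infer_instance

def pvWitness_solution : Int × Int × List Int := (4, 2, [1, 2, 3, 1])

def Spec_solution (k : Int) (m : Int) (score : List Int) (out : Int) : Prop := out = solution_alt k m score
instance (k : Int) (m : Int) (score : List Int) (out : Int) : Decidable (Spec_solution k m score out) := by unfold Spec_solution; infer_instance

-- ===== CLAIM (what is proved, stated in full; the proofs are below) =====
def Claim_equal_solution : Prop := ∀ (k : Int) (m : Int) (score : List Int), Dom_solution k m score → Pre_solution k m score → Spec_solution k m score (solution k m score)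

-- ===== LEMMAS AND PROOFS =====

-- the body of A's box-building loop
def pvStep (m : Int) (st : List (List Int) × List Int) (i : Int) : List (List Int) × List Int :=
  let arr := st.2 ++ [i]
  if m ≤ (arr.length : Int) then (st.1 ++ [arr], ([] : List Int)) else (st.1, arr)

-- too few elements: the pending box never fills, no box is emitted
lemma pvFold_small (m : Int) : ∀ (l : List Int) (t : List (List Int)) (a : List Int),
    ((a.length : Int) + l.length) < m → l.foldl (pvStep m) (t, a) = (t, a ++ l) := by
  intro l
  induction l with
  | nil => intro t a _; simp
  | cons i rest ih =>
    intro t a h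
    simp only [List.length_cons] at h
    simp only [List.foldl_cons, pvStep]
    have hc : ¬ m ≤ (((a ++ [i]).length : Nat) : Int) := by
      simp only [List.length_append, List.length_cons, List.length_nil]
      push_cast at h ⊢; omega
    rw [if_neg hc]
    rw [ih t (a ++ [i]) (by
      simp only [List.length_append, List.length_cons, List.length_nil]
      push_cast at h ⊢; omega)]
    simp

-- the emitted boxes are accumulated by appending on the right
lemma pvFold_fst (m : Int) : ∀ (l : List Int) (t : List (List Int)) (a : List Int),
    (l.foldl (pvStep m) (t, a)).1 = t ++ (l.foldl (pvStep m) ([], a)).1 := by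
  intro l
  induction l with
  | nil => intro t a; simp
  | cons i rest ih =>
    intro t a
    simp only [List.foldl_cons, pvStep]
    by_cases h : m ≤ (((a ++ [i]).length : Nat) : Int)
    · rw [if_pos h, if_pos h, ih (t ++ [a ++ [i]]) [], ih ([] ++ [a ++ [i]]) []]
      simp
    · rw [if_neg h, if_neg h, ih t (a ++ [i]), ih [] (a ++ [i])]

-- enough elements: the first m.toNat - a.length of them complete the pending box
lemma pvFold_fill (m : Int) (hm : 1 ≤ m) : ∀ (l : List Int) (t : List (List Int)) (a : List Int),
    (a.length : Int) < m → m ≤ (a.length : Int) + l.length →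
    l.foldl (pvStep m) (t, a)
      = (l.drop (m.toNat - a.length)).foldl (pvStep m) (t ++ [a ++ l.take (m.toNat - a.length)], []) := by
  intro l
  induction l with
  | nil => intro t a h1 h2; simp at h2; omega
  | cons i rest ih =>
    intro t a h1 h2
    simp only [List.length_cons] at h2
    simp only [List.foldl_cons, pvStep]
    by_cases h : m ≤ (((a ++ [i]).length : Nat) : Int)
    · rw [if_pos h]
      have hlen : m.toNat - a.length = 1 := by
        simp only [List.length_append, List.length_cons, List.length_nil] at h
        push_cast at h h1; omega
      rw [hlen]
      simp
    · rw [if_neg h]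
      simp only [List.length_append, List.length_cons, List.length_nil] at h
      push_cast at h
      have hk : m.toNat - a.length = (m.toNat - a.length - 1) + 1 := by omega
      have h' : (((a ++ [i]).length : Nat) : Int) < m := by
        simp only [List.length_append, List.length_cons, List.length_nil]; push_cast; omega
      have hrest : m ≤ (((a ++ [i]).length : Nat) : Int) + rest.length := by
        simp only [List.length_append, List.length_cons, List.length_nil]; push_cast at h2 ⊢; omega
      rw [ih t (a ++ [i]) h' hrest]
      have e1 : m.toNat - (a ++ [i]).length = m.toNat - a.length - 1 := by
        simp only [List.length_append, List.length_cons, List.length_nil]; omega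
      have e2 : a ++ (i :: rest).take (m.toNat - a.length)
          = (a ++ [i]) ++ rest.take (m.toNat - a.length - 1) := by
        rw [hk]; simp
      have e3 : (i :: rest).drop (m.toNat - a.length) = rest.drop (m.toNat - a.length - 1) := by
        rw [hk]; simp
      rw [e1, e2, e3]

-- on a descending chunk, the head of the ascending sort is the last element
lemma pvMin_of_desc (c : List Int) (hd : c.Pairwise (fun a b => b ≤ a)) (hne : c ≠ []) :
    PySem.List.pyGetD (PySem.List.sorted c (fun x => x) false) 0 0
      = c.getD (c.length - 1) 0 := by
  rcases hs : PySem.List.sorted c (fun x => x) false with _ | ⟨hmin, tl⟩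
  · exact absurd ((PySem.List.sorted_eq_nil_iff c _ false).mp hs) hne
  · have hlen : 0 < c.length := List.length_pos_iff.mpr hne
    have hlt : c.length - 1 < c.length := by omega
    rw [PySem.List.pyGetD_zero_cons]
    have hgd : c.getD (c.length - 1) 0 ∈ c := by
      rw [List.getD_eq_getElem?_getD, List.getElem?_eq_getElem hlt]
      simp only [Option.getD_some]
      exact List.getElem_mem hlt
    have hmem : hmin ∈ c := by
      have hp := PySem.List.sorted_perm c (fun x : Int => x) false
      rw [hs] at hp
      exact hp.mem_iff.mp (by simp)
    have hminle : ∀ y ∈ c, hmin ≤ y := PySem.List.key_head_sorted_le c (fun x => x) hs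
    have hlast_le : ∀ y ∈ c, c.getD (c.length - 1) 0 ≤ y := by
      intro y hy
      obtain ⟨j, hj, rfl⟩ := List.mem_iff_getElem.mp hy
      rw [List.getD_eq_getElem?_getD, List.getElem?_eq_getElem hlt]
      simp only [Option.getD_some]
      rcases Nat.lt_or_ge j (c.length - 1) with hj' | hj'
      · exact (List.pairwise_iff_getElem.mp hd) j (c.length - 1) hj hlt hj'
      · obtain rfl : j = c.length - 1 := by omega
        exact le_refl _
    exact le_antisymm (hminle _ hgd) (hlast_le _ hmem)

-- the core equivalence: A's per-box minima sum = B's stride-indexed sum, on a descending list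
lemma pvCore (M : Nat) (hM : 1 ≤ M) : ∀ (N : Nat) (l : List Int), l.length ≤ N →
    l.Pairwise (fun a b => b ≤ a) →
    (((l.foldl (pvStep (M : Int)) ([], [])).1).map
        (fun c => PySem.List.pyGetD (PySem.List.sorted c (fun x => x) false) 0 0 * (M : Int))).sum
      = ((List.range (l.length / M)).map
          (fun (j : Nat) => PySem.List.pyGetD l ((j : Int) * M + M - 1) 0 * (M : Int))).sum := by
  intro N
  induction N with
  | zero =>
    intro l hl _
    have : l = [] := List.eq_nil_of_length_eq_zero (by omega)
    subst this; simp
  | succ N ih =>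
    intro l hl hp
    by_cases hsmall : l.length < M
    · rw [pvFold_small (M : Int) l [] []
        (by simp only [List.length_nil, Nat.cast_zero, zero_add]; exact_mod_cast hsmall)]
      rw [Nat.div_eq_of_lt hsmall]
      simp
    · rw [Nat.not_lt] at hsmall
      have hfill := pvFold_fill (M : Int) (by exact_mod_cast hM) l [] []
        (by simp only [List.length_nil, Nat.cast_zero]; exact_mod_cast hM)
        (by simp only [List.length_nil, Nat.cast_zero, zero_add]; exact_mod_cast hsmall)
      simp only [List.nil_append, List.length_nil, Int.toNat_natCast, Nat.sub_zero] at hfill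
      rw [hfill, pvFold_fst]
      rw [List.map_append, List.sum_append]
      have hdroplen : (l.drop M).length = l.length - M := by simp
      have hdp : (l.drop M).Pairwise (fun a b => b ≤ a) := hp.sublist (List.drop_sublist _ _)
      have hlenN : (l.drop M).length ≤ N := by simp only [List.length_drop]; omega
      rw [ih (l.drop M) hlenN hdp]
      -- left summand: the first box's minimum
      have htake_ne : l.take M ≠ [] := by
        intro h
        have h' := congrArg List.length h
        rw [List.length_take, List.length_nil] at h'
        omega
      have htp : (l.take M).Pairwise (fun a b => b ≤ a) := hp.sublist (List.take_sublist _ _)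
      simp only [List.map_cons, List.map_nil, List.sum_cons, List.sum_nil, Int.add_zero]
      rw [pvMin_of_desc _ htp htake_ne]
      have htlen : (l.take M).length = M := by simp; omega
      -- index bookkeeping on the right-hand side
      have hdiv : l.length / M = (l.length - M) / M + 1 := by
        rw [Nat.div_eq_sub_div (by omega) hsmall]
      rw [hdiv, List.range_succ_eq_map, List.map_cons, List.sum_cons, List.map_map]
      congr 1
      · -- the first box's minimum is l[M-1]
        have hM1 : ((0 : Nat) : Int) * M + M - 1 = ((M - 1 : Nat) : Int) := by push_cast; omega
        have h0 : PySem.List.pyGetD l (((0 : Nat) : Int) * (M : Int) + M - 1) 0 = l.getD (M - 1) 0 := by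
          rw [hM1, PySem.List.pyGetD_natCast]
        rw [h0]
        have e : (l.take M).getD ((l.take M).length - 1) 0 = l.getD (M - 1) 0 := by
          rw [htlen]
          have h1 : M - 1 < l.length := by omega
          rw [List.getD_eq_getElem?_getD, List.getD_eq_getElem?_getD,
            List.getElem?_eq_getElem (by omega), List.getElem?_eq_getElem h1]
          simp [List.getElem_take]
        rw [e]
      · rw [hdroplen]
        refine congrArg List.sum (List.map_congr_left ?_)
        intro j hj
        have hjlt : j < (l.length - M) / M := List.mem_range.mp hj
        have hjbound : j * M + M ≤ l.length - M := by
          have := (Nat.le_div_iff_mul_le (by omega)).mp (Nat.succ_le_of_lt hjlt)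
          calc j * M + M = (j + 1) * M := by ring
            _ ≤ l.length - M := this
        have hmul : (j + 1) * M = j * M + M := by ring
        have hge : 1 ≤ (j + 1) * M + M := by omega
        have hge' : 1 ≤ j * M + M := by omega
        have hidx : ((j + 1 : Nat) : Int) * M + M - 1 = (((j + 1) * M + M - 1 : Nat) : Int) := by
          rw [Nat.cast_sub hge]; push_cast; ring
        have hidx' : ((j : Nat) : Int) * M + M - 1 = ((j * M + M - 1 : Nat) : Int) := by
          rw [Nat.cast_sub hge']; push_cast; ring
        simp only [Function.comp]
        rw [hidx, hidx', PySem.List.pyGetD_natCast, PySem.List.pyGetD_natCast]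
        congr 1
        have h1 : (j + 1) * M + M - 1 < l.length := by omega
        have h2 : j * M + M - 1 < (l.drop M).length := by rw [hdroplen]; omega
        rw [List.getD_eq_getElem?_getD, List.getD_eq_getElem?_getD,
          List.getElem?_eq_getElem h1, List.getElem?_eq_getElem h2]
        simp only [Option.getD_some]
        rw [List.getElem_drop]
        congr 1
        omega

-- ===== VERDICT (by name: the statement is the Claim_ definition above) =====
theorem solution_spec : Claim_equal_solution := by
  intro k m score _ hm
  have hm1 : (1 : Int) ≤ m := hm
  unfold Spec_solution solution solution_alt
  set s := PySem.List.sorted score (fun x => x) true with hs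
  have hm' : m = ((m.toNat : Nat) : Int) := by omega
  have hsp : s.Pairwise (fun a b : Int => b ≤ a) := PySem.List.sorted_pairwise_rev score _
  have hfd : PySem.Int.floordiv (s.length : Int) m = ((s.length / m.toNat : Nat) : Int) := by
    conv_lhs => rw [hm']
    rw [PySem.Int.floordiv_natCast]
  simp only [hfd]
  rw [PySem.List.pyRange_one 0 _]
  simp only [Int.sub_zero, Int.toNat_natCast, List.map_map]
  rw [PySem.List.foldl_add (l := ((PySem.List.sorted score (fun x => x) true).foldl
      (fun (st : List (List Int) × List Int) i =>
        let arr := st.2 ++ [i]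
        if m ≤ (arr.length : Int) then (st.1 ++ [arr], ([] : List Int)) else (st.1, arr)) ([], [])).1)]
  rw [Int.zero_add]
  have hstep : ((PySem.List.sorted score (fun x => x) true).foldl
      (fun (st : List (List Int) × List Int) i =>
        let arr := st.2 ++ [i]
        if m ≤ (arr.length : Int) then (st.1 ++ [arr], ([] : List Int)) else (st.1, arr)) ([], []))
      = s.foldl (pvStep m) ([], []) := rfl
  rw [hstep, hm']
  simp only [Int.toNat_natCast]
  have := pvCore m.toNat (by omega) s.length s (le_refl _) hsp
  rw [this]
  refine congrArg List.sum (List.map_congr_left ?_)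
  intro j _
  simp only [Function.comp_apply, Int.zero_add]
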